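-- pv_equiv track=rewrite | github.com/FlachaireNathan/ProjetInnovationS-curit- | analyser.py | getNbSameWords
-- ===== SOURCE A (Python) =====
-- def getNbSameWords(listOfWords):
-- 	counter = 0
-- 	for word1 in listOfWords:
-- 		for word2 in listOfWords:
-- 			if (word1 == word2):
-- 				counter += 1
-- 	counter -= len(listOfWords)
-- 	return counter
-- ===== SOURCE B (Python) =====
-- def getNbSameWords(listOfWords):
--     counts = {}
--     for w in listOfWords:
--         counts[w] = counts.get(w, 0) + 1
--     return sum(c * c for c in counts.values()) - len(listOfWords)
-- ===== Notes on version B (the rewrite author's own statement) =====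
-- stated objective: faster
-- what changed: Replaced the nested O(n^2) scan counting equal ordered pairs by a single pass building a frequency dictionary, returning sum of squared counts minus the length.
import Mathlib
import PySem

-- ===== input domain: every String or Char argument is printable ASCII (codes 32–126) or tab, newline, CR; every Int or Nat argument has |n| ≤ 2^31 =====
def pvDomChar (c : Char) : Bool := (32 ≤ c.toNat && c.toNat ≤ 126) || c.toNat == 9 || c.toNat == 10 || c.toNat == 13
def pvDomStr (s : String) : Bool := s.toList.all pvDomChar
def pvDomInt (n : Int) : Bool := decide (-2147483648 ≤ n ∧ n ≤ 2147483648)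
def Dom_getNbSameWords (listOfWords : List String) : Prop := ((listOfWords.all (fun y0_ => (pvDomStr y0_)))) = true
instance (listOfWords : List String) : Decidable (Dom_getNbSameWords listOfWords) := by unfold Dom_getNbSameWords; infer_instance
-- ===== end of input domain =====

-- B replaces A's nested quadratic equal-pair scan by a one-pass frequency dictionary (sum of squared counts minus length); objective: faster (asymptotic).


-- ===== PORT A =====
def getNbSameWords (listOfWords : List String) : Int :=
  (listOfWords.foldl
    (fun counter word1 =>
      listOfWords.foldl
        (fun counter word2 => if word1 == word2 then counter + 1 else counter)
        counter)
    0) - listOfWords.length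

-- ===== PORT B =====
def getNbSameWords_alt (listOfWords : List String) : Int :=
  (((listOfWords.foldl (fun d w => d.insert w (d.getD w 0 + 1))
      (PySem.Dict.empty : PySem.Dict String Int)).values).map (fun c => c * c)).sum
    - listOfWords.length

-- ===== PRECONDITION & SPEC =====
def Spec_getNbSameWords (listOfWords : List String) (out : Int) : Prop := out = getNbSameWords_alt listOfWords
instance (listOfWords : List String) (out : Int) : Decidable (Spec_getNbSameWords listOfWords out) := by unfold Spec_getNbSameWords; infer_instance

-- ===== CLAIM (what is proved, stated in full; the proofs are below) =====
def Claim_equal_getNbSameWords : Prop := ∀ (listOfWords : List String), Dom_getNbSameWords listOfWords → Spec_getNbSameWords listOfWords (getNbSameWords listOfWords)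

-- ===== LEMMAS AND PROOFS =====

-- Σ_{d ∈ D} (if d = a then f d else 0) = f a for a duplicate-free D containing a
theorem pv_sum_if_eq (f : String → Int) (D : List String) (a : String)
    (hD : D.Nodup) (ha : a ∈ D) :
    (D.map (fun d => if d = a then f d else 0)).sum = f a := by
  induction D with
  | nil => cases ha
  | cons x t ih =>
    rcases List.nodup_cons.mp hD with ⟨hx, ht⟩
    simp only [List.map_cons, List.sum_cons]
    rcases List.mem_cons.mp ha with h | h
    · subst h
      have hz : (t.map (fun d => if d = a then f d else 0)).sum = 0 := by
        apply List.sum_eq_zero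
        intro y hy
        rcases List.mem_map.mp hy with ⟨d, hd, rfl⟩
        exact if_neg (fun hh : d = a => hx (hh ▸ hd))
      rw [if_pos rfl, hz]; ring
    · rw [if_neg (fun he : x = a => hx (he ▸ h)), ih ht h]; ring

-- Grouping identity: a sum over l equals the count-weighted sum over any
-- duplicate-free list D covering l's elements.
theorem pv_sum_grouped (f : String → Int) (D : List String) (hD : D.Nodup) :
    ∀ l : List String, (∀ x ∈ l, x ∈ D) →
      (l.map f).sum = (D.map (fun d => (l.count d : Int) * f d)).sum := by
  intro l
  induction l with
  | nil => intro _; simp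
  | cons a t ih =>
    intro hsub
    have ha : a ∈ D := hsub a (List.mem_cons_self)
    have ht : ∀ x ∈ t, x ∈ D := fun x hx => hsub x (List.mem_cons_of_mem a hx)
    have hcnt : ∀ d : String, (((a :: t).count d : Int)) =
        (t.count d : Int) + (if d = a then 1 else 0) := by
      intro d
      rw [List.count_cons]
      push_cast
      by_cases h : d = a
      · simp [h]
      · simp [h]
        exact fun he => h he.symm
    calc (List.map f (a :: t)).sum
        = f a + (t.map f).sum := by simp
      _ = f a + (D.map (fun d => (t.count d : Int) * f d)).sum := by rw [ih ht]
      _ = (D.map (fun d => ((a :: t).count d : Int) * f d)).sum := by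
          have hmap : (D.map (fun d => ((a :: t).count d : Int) * f d)) =
              (D.map (fun d => (t.count d : Int) * f d
                + (if d = a then f d else 0))) := by
            apply List.map_congr_left
            intro d _
            rw [hcnt d]
            by_cases h : d = a
            · simp [h]; ring
            · simp [h]
          rw [hmap, List.sum_map_add, pv_sum_if_eq f D a hD ha]
          ring

-- A's inner loop adds the number of occurrences of word1.
theorem pv_inner (w1 : String) :
    ∀ (m : List String) (c : Int),
      m.foldl (fun c2 w2 => if w1 == w2 then c2 + 1 else c2) c
        = c + (m.count w1 : Int) := by
  intro m
  induction m with
  | nil => intro c; simp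
  | cons x t ih =>
    intro c
    have hcast : (((x :: t).count w1 : Int))
        = (t.count w1 : Int) + (if w1 = x then 1 else 0) := by
      by_cases h : w1 = x
      · simp [h]
      · simp [List.count_cons, h]
        exact fun he => h he.symm
    simp only [List.foldl_cons]
    by_cases h : w1 = x
    · rw [if_pos (by simp [h]), ih (c + 1), hcast, if_pos h]; ring
    · rw [if_neg (by simp [h]), ih c, hcast, if_neg h]; ring

-- A's outer loop sums those counts.
theorem pv_outer (l : List String) :
    ∀ (m : List String) (c : Int),
      m.foldl (fun c w1 =>
          l.foldl (fun c2 w2 => if w1 == w2 then c2 + 1 else c2) c) c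
        = c + (m.map (fun w => (l.count w : Int))).sum := by
  intro m
  induction m with
  | nil => intro c; simp
  | cons a t ih =>
    intro c
    simp only [List.foldl_cons, List.map_cons, List.sum_cons]
    rw [pv_inner a l c, ih]
    ring

-- A computes Σ_{w ∈ l} count w l, minus the length.
theorem pv_a_eq_sum (l : List String) :
    getNbSameWords l = (l.map (fun w => (l.count w : Int))).sum - l.length := by
  unfold getNbSameWords
  rw [pv_outer l l 0]
  ring

-- B's dictionary pass yields the squared counts over the distinct words.
theorem pv_b_eq_sum (l : List String) :
    getNbSameWords_alt l =
      ((PySem.Set.ofList l).map (fun d => (l.count d : Int) * (l.count d : Int))).sum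
        - l.length := by
  unfold getNbSameWords_alt
  rw [PySem.Dict.foldl_insert_getD_add_one_eq_counter]
  congr 1
  have hv : (PySem.Dict.counter l).values
      = (PySem.Set.ofList l).map (fun k => (l.count k : Int)) := by
    simp [PySem.Dict.values, PySem.Dict.items_counter]
  rw [hv, List.map_map]
  rfl

-- ===== VERDICT (by name: the statement is the Claim_ definition above) =====
theorem getNbSameWords_spec : Claim_equal_getNbSameWords := by
  intro l _
  show getNbSameWords l = getNbSameWords_alt l
  rw [pv_a_eq_sum, pv_b_eq_sum,
    pv_sum_grouped (fun w => (l.count w : Int)) (PySem.Set.ofList l)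
      (PySem.Set.nodup_ofList l) l (fun x hx => (PySem.Set.mem_ofList l x).mpr hx)]
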